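-- pv_equiv track=rewrite | github.com/zurukumo/kago-utils | kago_utils/shanten.py | __divide_into_four
-- ===== SOURCE A (Python) =====
-- def __divide_into_four(n: int) -> list[tuple[int, int, int, int]]:
--     ret = []
--     for a in range(n + 1):
--         for b in range(n - a + 1):
--             for c in range(n - a - b + 1):
--                 d = n - a - b - c
--                 ret.append((a, b, c, d))
--     return ret
-- ===== SOURCE B (Python) =====
-- def __divide_into_four(n: int) -> list[tuple[int, int, int, int]]:
--     # Stars and bars: a composition (a,b,c,d) of n corresponds to bar
--     # positions p1 < p2 < p3 in a row of n+3 slots; lexicographic bar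
--     # triples reproduce the lexicographic (a,b,c) order.
--     ret = []
--     m = n + 3
--     t = n + 2
--     for p1 in range(m):
--         for p2 in range(p1 + 1, m):
--             b = p2 - p1 - 1
--             q = p2 + 1
--             ret += [(p1, b, p3 - q, t - p3) for p3 in range(q, m)]
--     return ret
-- ===== Notes on version B (the rewrite author's own statement) =====
-- stated objective: alternative
-- what changed: Replaces the value-nested loops with data-dependent residual bounds (a, then b up to n-a, then c up to n-a-b) by a stars-and-bars enumeration of bar positions p1<p2<p3 over a fixed row of n+3 slots, decoding each triple into the composition by gap arithmetic; lexicographic bar triples reproduce A's exact output order.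
import Mathlib
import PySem

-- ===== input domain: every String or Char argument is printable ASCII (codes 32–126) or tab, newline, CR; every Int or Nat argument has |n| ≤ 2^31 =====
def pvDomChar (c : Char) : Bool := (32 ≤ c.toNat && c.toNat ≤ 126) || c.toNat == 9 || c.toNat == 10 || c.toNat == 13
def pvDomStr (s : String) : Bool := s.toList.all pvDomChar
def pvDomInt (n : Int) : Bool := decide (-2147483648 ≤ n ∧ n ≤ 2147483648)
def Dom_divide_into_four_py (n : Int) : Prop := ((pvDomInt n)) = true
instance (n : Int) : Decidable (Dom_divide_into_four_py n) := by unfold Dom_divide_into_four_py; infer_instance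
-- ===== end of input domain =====

-- B enumerates the compositions by stars-and-bars over bar positions p1<p2<p3 instead of
-- A's value-nested loops with residual bounds; same output, same order (objective: alternative).

-- ===== PORT A =====
def divide_into_four_py (n : Int) : List (Int × Int × Int × Int) :=
  (PySem.List.pyRange 0 (n + 1) 1).foldl (fun ret a =>
    (PySem.List.pyRange 0 (n - a + 1) 1).foldl (fun ret b =>
      (PySem.List.pyRange 0 (n - a - b + 1) 1).foldl (fun ret c =>
        ret ++ [(a, b, c, n - a - b - c)]) ret) ret) []

-- ===== PORT B =====
def divide_into_four_py_alt (n : Int) : List (Int × Int × Int × Int) :=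
  let m := n + 3
  let t := n + 2
  (PySem.List.pyRange 0 m 1).foldl (fun ret p1 =>
    (PySem.List.pyRange (p1 + 1) m 1).foldl (fun ret p2 =>
      let b := p2 - p1 - 1
      let q := p2 + 1
      ret ++ (PySem.List.pyRange q m 1).map (fun p3 => (p1, b, p3 - q, t - p3))) ret) []

-- ===== PRECONDITION & SPEC =====
def Spec_divide_into_four_py (n : Int) (out : List (Int × Int × Int × Int)) : Prop := out = divide_into_four_py_alt n
instance (n : Int) (out : List (Int × Int × Int × Int)) : Decidable (Spec_divide_into_four_py n out) := by unfold Spec_divide_into_four_py; infer_instance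

-- ===== CLAIM (what is proved, stated in full; the proofs are below) =====
def Claim_equal_divide_into_four_py : Prop := ∀ (n : Int), Dom_divide_into_four_py n → Spec_divide_into_four_py n (divide_into_four_py n)

-- ===== LEMMAS AND PROOFS =====

-- flatMap forms of the two ports
lemma A_flatMap (n : Int) : divide_into_four_py n =
    (PySem.List.pyRange 0 (n + 1) 1).flatMap (fun a =>
      (PySem.List.pyRange 0 (n - a + 1) 1).flatMap (fun b =>
        (PySem.List.pyRange 0 (n - a - b + 1) 1).map (fun c => (a, b, c, n - a - b - c)))) := by
  unfold divide_into_four_py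
  simp only [PySem.List.foldl_append_eq_flatMap, List.nil_append]
  simp only [← List.map_eq_flatMap]

lemma B_flatMap (n : Int) : divide_into_four_py_alt n =
    (PySem.List.pyRange 0 (n + 3) 1).flatMap (fun p1 =>
      (PySem.List.pyRange (p1 + 1) (n + 3) 1).flatMap (fun p2 =>
        (PySem.List.pyRange (p2 + 1) (n + 3) 1).map (fun p3 => (p1, p2 - p1 - 1, p3 - (p2 + 1), n + 2 - p3)))) := by
  unfold divide_into_four_py_alt
  simp only [PySem.List.foldl_append_eq_flatMap, List.nil_append]

-- innermost level: exact reindexing, no trimming needed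
lemma level3 (n p1 p2 : Int) :
    (PySem.List.pyRange (p2 + 1) (n + 3) 1).map (fun p3 => (p1, p2 - p1 - 1, p3 - (p2 + 1), n + 2 - p3)) =
    (PySem.List.pyRange 0 (n - p1 - (p2 - p1 - 1) + 1) 1).map
      (fun c => (p1, p2 - p1 - 1, c, n - p1 - (p2 - p1 - 1) - c)) := by
  rw [PySem.List.pyRange_one, PySem.List.pyRange_one, List.map_map, List.map_map]
  have hlen : (n + 3 - (p2 + 1)).toNat = (n - p1 - (p2 - p1 - 1) + 1 - 0).toNat := by omega
  rw [hlen]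
  refine List.map_congr_left ?_
  intro k _
  simp only [Function.comp_apply, Prod.mk.injEq, true_and]
  exact ⟨by omega, by omega⟩

-- for p1 beyond A's range the whole inner double loop of B contributes nothing
lemma Gempty (n p1 : Int) (h : n < p1) :
    (PySem.List.pyRange (p1 + 1) (n + 3) 1).flatMap (fun p2 =>
      (PySem.List.pyRange (p2 + 1) (n + 3) 1).map (fun p3 => (p1, p2 - p1 - 1, p3 - (p2 + 1), n + 2 - p3))) = [] := by
  rw [List.flatMap_eq_nil_iff]
  intro p2 hp2
  rw [PySem.List.mem_pyRange_one] at hp2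
  have : PySem.List.pyRange (p2 + 1) (n + 3) 1 = [] :=
    PySem.List.pyRange_one_eq_nil (by omega)
  simp [this]

-- inside A's range the inner double loops agree after reindexing b = p2 - p1 - 1
lemma Gmain (n p1 : Int) (h1 : p1 ≤ n) :
    (PySem.List.pyRange (p1 + 1) (n + 3) 1).flatMap (fun p2 =>
      (PySem.List.pyRange (p2 + 1) (n + 3) 1).map (fun p3 => (p1, p2 - p1 - 1, p3 - (p2 + 1), n + 2 - p3))) =
    (PySem.List.pyRange 0 (n - p1 + 1) 1).flatMap (fun b =>
      (PySem.List.pyRange 0 (n - p1 - b + 1) 1).map (fun c => (p1, b, c, n - p1 - b - c))) := by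
  rw [PySem.List.pyRange_one_append (p1 + 1) (n + 2) (n + 3) (by omega) (by omega)]
  rw [List.flatMap_append]
  have hlast : (PySem.List.pyRange (n + 2) (n + 3) 1).flatMap (fun p2 =>
      (PySem.List.pyRange (p2 + 1) (n + 3) 1).map (fun p3 => (p1, p2 - p1 - 1, p3 - (p2 + 1), n + 2 - p3))) = [] := by
    have h1 : PySem.List.pyRange (n + 2) (n + 3) 1 = [n + 2] := by
      rw [show (n : Int) + 3 = (n + 2) + 1 by ring]
      exact PySem.List.pyRange_one_singleton _
    rw [h1]
    simp [PySem.List.pyRange_one_eq_nil (by omega : (n:Int) + 3 ≤ n + 2 + 1)]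
  rw [hlast, List.append_nil]
  rw [PySem.List.pyRange_one (p1 + 1) (n + 2), PySem.List.pyRange_one 0 (n - p1 + 1)]
  rw [List.flatMap_map, List.flatMap_map]
  have hlen : (n + 2 - (p1 + 1)).toNat = (n - p1 + 1 - 0).toNat := by omega
  rw [hlen]
  refine List.flatMap_congr ?_
  intro k _
  rw [level3 n p1 (p1 + 1 + (k : Int))]
  have e1 : (p1 + 1 + (k : Int)) - p1 - 1 = 0 + (k : Int) := by ring
  have e2 : n - p1 - ((p1 + 1 + (k : Int)) - p1 - 1) + 1 = n - p1 - (0 + (k : Int)) + 1 := by ring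
  rw [e2]
  refine List.map_congr_left ?_
  intro c _
  rw [e1]

-- ===== VERDICT (by name: the statement is the Claim_ definition above) =====
theorem divide_into_four_py_spec : Claim_equal_divide_into_four_py := by
  intro n _
  show divide_into_four_py n = divide_into_four_py_alt n
  rw [A_flatMap, B_flatMap]
  by_cases hn : 0 ≤ n + 1
  · rw [PySem.List.pyRange_one_append 0 (n + 1) (n + 3) hn (by omega), List.flatMap_append]
    have htail : (PySem.List.pyRange (n + 1) (n + 3) 1).flatMap (fun p1 =>
        (PySem.List.pyRange (p1 + 1) (n + 3) 1).flatMap (fun p2 =>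
          (PySem.List.pyRange (p2 + 1) (n + 3) 1).map (fun p3 => (p1, p2 - p1 - 1, p3 - (p2 + 1), n + 2 - p3)))) = [] := by
      rw [List.flatMap_eq_nil_iff]
      intro p1 hp1
      rw [PySem.List.mem_pyRange_one] at hp1
      exact Gempty n p1 (by omega)
    rw [htail, List.append_nil]
    refine List.flatMap_congr ?_
    intro p1 hp1
    rw [PySem.List.mem_pyRange_one] at hp1
    exact (Gmain n p1 (by omega)).symm
  · have hA : PySem.List.pyRange 0 (n + 1) 1 = [] := PySem.List.pyRange_one_eq_nil (by omega)
    rw [hA, List.flatMap_nil]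
    symm
    rw [List.flatMap_eq_nil_iff]
    intro p1 hp1
    rw [PySem.List.mem_pyRange_one] at hp1
    exact Gempty n p1 (by omega)
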